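-- pv_equiv track=rewrite | github.com/Eduardo-vsouza/rp3 | ribocov/seqdist.py | __filter_coverage_data
-- ===== SOURCE A (Python) =====
-- def __filter_coverage_data(positions, coverage, regions):
--     filtered_positions = []
--     filtered_coverage = []
--     for pos, cov in zip(positions, coverage):
--         for region_start, region_end in regions:
--             if region_start <= pos <= region_end:
--                 filtered_positions.append(pos)
--                 filtered_coverage.append(cov)
--                 break  # Break the loop if the position is within any of the regions
--     return filtered_positions, filtered_coverage
-- ===== SOURCE B (Python) =====
-- def __filter_coverage_data(positions, coverage, regions):
--     # Sort regions by start once, keep a running (prefix) max of region ends,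
--     # then binary-search each position instead of scanning all regions.
--     rs = sorted(regions, key=lambda r: r[0])
--     starts = [r[0] for r in rs]
--     prefmax = []
--     m = None
--     for r in rs:
--         if m is None or r[1] > m:
--             m = r[1]
--         prefmax.append(m)
--     filtered_positions = []
--     filtered_coverage = []
--     for pos, cov in zip(positions, coverage):
--         lo, hi = 0, len(starts)
--         while lo < hi:
--             mid = (lo + hi) // 2
--             if starts[mid] <= pos:
--                 lo = mid + 1
--             else:
--                 hi = mid
--         if lo > 0 and prefmax[lo - 1] >= pos:
--             filtered_positions.append(pos)
--             filtered_coverage.append(cov)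
--     return filtered_positions, filtered_coverage
-- ===== Notes on version B (the rewrite author's own statement) =====
-- stated objective: faster
-- what changed: Instead of scanning all regions for every position, B sorts regions by start once, precomputes a prefix-maximum of region ends, and decides membership of each position with a binary search over the sorted starts.
import Mathlib
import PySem

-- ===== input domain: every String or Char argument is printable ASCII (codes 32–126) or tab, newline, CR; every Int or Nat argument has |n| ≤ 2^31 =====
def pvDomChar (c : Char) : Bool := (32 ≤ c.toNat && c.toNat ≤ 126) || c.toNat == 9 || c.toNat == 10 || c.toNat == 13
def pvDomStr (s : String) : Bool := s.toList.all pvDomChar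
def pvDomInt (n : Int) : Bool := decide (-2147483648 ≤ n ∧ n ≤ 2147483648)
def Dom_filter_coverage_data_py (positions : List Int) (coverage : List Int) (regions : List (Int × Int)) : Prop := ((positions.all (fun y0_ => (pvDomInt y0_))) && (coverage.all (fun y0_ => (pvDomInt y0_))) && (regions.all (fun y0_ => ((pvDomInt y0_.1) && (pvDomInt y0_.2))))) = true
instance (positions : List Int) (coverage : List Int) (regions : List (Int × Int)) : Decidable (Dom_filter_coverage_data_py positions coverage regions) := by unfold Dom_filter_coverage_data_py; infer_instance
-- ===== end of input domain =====

-- B sorts the regions once, keeps a prefix-maximum of region ends and binary-searches each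
-- position, replacing A's per-position scan of all regions (objective: faster, asymptotic).


-- ===== PORT A =====
-- inner 'for region in regions: … break' — first region containing pos stops the scan
def pvA_inRegion (pos : Int) : List (Int × Int) → Bool
  | [] => false
  | (s, e) :: rest => if s ≤ pos ∧ pos ≤ e then true else pvA_inRegion pos rest

def filter_coverage_data_py (positions : List Int) (coverage : List Int) (regions : List (Int × Int)) : List Int × List Int :=
  (positions.zip coverage).foldl
    (fun acc pc =>
      if pvA_inRegion pc.1 regions then (acc.1 ++ [pc.1], acc.2 ++ [pc.2]) else acc)
    ([], [])

-- ===== PORT B =====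
-- Source B's hand-written while-loop binary search (bisect_right over starts);
-- starts[mid] via getD: the index (lo+hi)/2 is always in range when lo < hi ≤ len, so getD is exact
def pvB_bsearch (starts : List Int) (pos : Int) (lo hi : Nat) : Nat :=
  if lo < hi then
    let mid := (lo + hi) / 2
    if starts.getD mid 0 ≤ pos then pvB_bsearch starts pos (mid + 1) hi
    else pvB_bsearch starts pos lo mid
  else lo
termination_by hi - lo
decreasing_by all_goals omega

-- the running-maximum loop building prefmax (m : Option Int is Python's m = None sentinel)
def pvB_prefmax : List (Int × Int) → Option Int → List Int
  | [], _ => []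
  | r :: rest, m =>
      let m' := match m with
        | none => r.2
        | some mv => if r.2 > mv then r.2 else mv
      m' :: pvB_prefmax rest (some m')

def filter_coverage_data_py_alt (positions : List Int) (coverage : List Int) (regions : List (Int × Int)) : List Int × List Int :=
  let rs := PySem.List.sorted regions (fun r => r.1)
  let starts := rs.map (fun r => r.1)
  let prefmax := pvB_prefmax rs none
  (positions.zip coverage).foldl
    (fun acc pc =>
      let lo := pvB_bsearch starts pc.1 0 starts.length
      -- prefmax[lo-1] via getD: 0 < lo ≤ len so the index is in range, getD is exact
      if lo > 0 ∧ prefmax.getD (lo - 1) 0 ≥ pc.1 then (acc.1 ++ [pc.1], acc.2 ++ [pc.2]) else acc)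
    ([], [])

-- ===== PRECONDITION & SPEC =====
def Spec_filter_coverage_data_py (positions : List Int) (coverage : List Int) (regions : List (Int × Int)) (out : List Int × List Int) : Prop := out = filter_coverage_data_py_alt positions coverage regions
instance (positions : List Int) (coverage : List Int) (regions : List (Int × Int)) (out : List Int × List Int) : Decidable (Spec_filter_coverage_data_py positions coverage regions out) := by unfold Spec_filter_coverage_data_py; infer_instance

-- ===== CLAIM (what is proved, stated in full; the proofs are below) =====
def Claim_equal_filter_coverage_data_py : Prop := ∀ (positions : List Int) (coverage : List Int) (regions : List (Int × Int)), Dom_filter_coverage_data_py positions coverage regions → Spec_filter_coverage_data_py positions coverage regions (filter_coverage_data_py positions coverage regions)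

-- ===== LEMMAS AND PROOFS =====

theorem pvA_inRegion_iff (pos : Int) (regions : List (Int × Int)) :
    pvA_inRegion pos regions = true ↔ ∃ r ∈ regions, r.1 ≤ pos ∧ pos ≤ r.2 := by
  induction regions with
  | nil => simp [pvA_inRegion]
  | cons r rest ih =>
      by_cases h : r.1 ≤ pos ∧ pos ≤ r.2
      · simp [pvA_inRegion, h]
      · simp only [pvA_inRegion, if_neg h, ih, List.mem_cons]
        constructor
        · rintro ⟨q, hq, hqp⟩; exact ⟨q, Or.inr hq, hqp⟩
        · rintro ⟨q, hq | hq, hqp⟩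
          · exact absurd (hq ▸ hqp) h
          · exact ⟨q, hq, hqp⟩

theorem pvB_prefmax_iff (pos : Int) :
    ∀ (rs : List (Int × Int)) (m0 : Option Int) (j : Nat), j < rs.length →
      (pos ≤ (pvB_prefmax rs m0).getD j 0 ↔
        (m0.elim False (fun mv => pos ≤ mv)) ∨ ((rs.take (j + 1)).any (fun r => decide (pos ≤ r.2))) = true) := by
  intro rs
  induction rs with
  | nil => intro m0 j hj; simp at hj
  | cons r rest ih =>
      intro m0 j hj
      match j with
      | 0 =>
          cases m0 with
          | none => simp [pvB_prefmax]
          | some mv =>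
              simp only [pvB_prefmax, List.take_succ_cons, List.take_zero, List.getD_cons_zero,
                List.any_cons, List.any_nil, Option.elim, Bool.or_false, decide_eq_true_eq]
              split_ifs with h <;> omega
      | j + 1 =>
          have hj' : j < rest.length := by simpa using hj
          simp only [pvB_prefmax, List.getD_cons_succ, List.take_succ_cons, List.any_cons]
          rw [ih (some (match m0 with
                | none => r.2
                | some mv => if r.2 > mv then r.2 else mv)) j hj']
          cases m0 with
          | none => simp
          | some mv =>
              simp only [Option.elim, decide_eq_true_eq, Bool.or_eq_true]
              split_ifs with h
              · constructor
                · rintro (h1 | h1)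
                  · exact Or.inr (Or.inl h1)
                  · exact Or.inr (Or.inr h1)
                · rintro (h1 | h1 | h1)
                  · exact Or.inl (by omega)
                  · exact Or.inl h1
                  · exact Or.inr h1
              · constructor
                · rintro (h1 | h1)
                  · exact Or.inl h1
                  · exact Or.inr (Or.inr h1)
                · rintro (h1 | h1 | h1)
                  · exact Or.inl h1
                  · exact Or.inl (by omega)
                  · exact Or.inr h1

theorem pvB_bsearch_spec (starts : List Int) (pos : Int)
    (hs : starts.Pairwise (· ≤ ·)) :
    ∀ (n lo hi : Nat), hi - lo ≤ n → lo ≤ hi → hi ≤ starts.length →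
      (∀ (j : Nat) (hj : j < starts.length), j < lo → starts[j] ≤ pos) →
      (∀ (j : Nat) (hj : j < starts.length), hi ≤ j → pos < starts[j]) →
      lo ≤ pvB_bsearch starts pos lo hi ∧ pvB_bsearch starts pos lo hi ≤ hi ∧
      (∀ (j : Nat) (hj : j < starts.length), j < pvB_bsearch starts pos lo hi → starts[j] ≤ pos) ∧
      (∀ (j : Nat) (hj : j < starts.length), pvB_bsearch starts pos lo hi ≤ j → pos < starts[j]) := by
  have hmono : ∀ (i j : Nat) (hi_ : i < starts.length) (hj_ : j < starts.length), i ≤ j → starts[i] ≤ starts[j] := by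
    intro i j hi_ hj_ hij
    rcases Nat.lt_or_ge i j with h | h
    · exact (List.pairwise_iff_getElem.mp hs) i j hi_ hj_ h
    · have : i = j := by omega
      subst this; exact le_refl _
  intro n
  induction n with
  | zero =>
      intro lo hi hfuel hlohi hhi hbelow habove
      have : lo = hi := by omega
      subst this
      rw [pvB_bsearch]
      simp only [lt_irrefl, if_false]
      exact ⟨le_refl _, le_refl _, fun j hj hjlo => hbelow j hj hjlo, fun j hj hloj => habove j hj hloj⟩
  | succ n ihn =>
      intro lo hi hfuel hlohi hhi hbelow habove
      rw [pvB_bsearch]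
      by_cases hlt : lo < hi
      · simp only [hlt, if_true]
        have hmid : (lo + hi) / 2 < starts.length := by omega
        rw [List.getD_eq_getElem _ _ hmid]
        by_cases hcmp : starts[(lo + hi) / 2] ≤ pos
        · simp only [hcmp, if_true]
          have := ihn ((lo + hi) / 2 + 1) hi (by omega) (by omega) hhi
            (fun j hj hjlt => le_trans (hmono j ((lo + hi) / 2) hj hmid (by omega)) hcmp)
            habove
          exact ⟨by omega, this.2.1, this.2.2.1, this.2.2.2⟩
        · simp only [hcmp, if_false]
          have := ihn lo ((lo + hi) / 2) (by omega) (by omega) (by omega)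
            hbelow
            (fun j hj hjge => lt_of_lt_of_le (lt_of_not_ge hcmp) (hmono ((lo + hi) / 2) j hmid hj hjge))
          exact ⟨this.1, by omega, this.2.2.1, this.2.2.2⟩
      · simp only [hlt, if_false]
        have : lo = hi := by omega
        subst this
        exact ⟨le_refl _, le_refl _, fun j hj hjlo => hbelow j hj hjlo, fun j hj hloj => habove j hj hloj⟩

-- B's membership test equals A's inner scan
theorem pvTest_iff (pos : Int) (regions : List (Int × Int)) :
    (pvB_bsearch ((PySem.List.sorted regions (fun r => r.1)).map (fun r => r.1)) pos 0
        ((PySem.List.sorted regions (fun r => r.1)).map (fun r => r.1)).length > 0 ∧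
      (pvB_prefmax (PySem.List.sorted regions (fun r => r.1)) none).getD
        (pvB_bsearch ((PySem.List.sorted regions (fun r => r.1)).map (fun r => r.1)) pos 0
          ((PySem.List.sorted regions (fun r => r.1)).map (fun r => r.1)).length - 1) 0 ≥ pos) ↔
    pvA_inRegion pos regions = true := by
  set rs := PySem.List.sorted regions (fun r => r.1) with hrs
  set starts := rs.map (fun r => r.1) with hstarts
  have hlen : starts.length = rs.length := by simp [hstarts]
  have hpw : starts.Pairwise (· ≤ ·) := by
    rw [hstarts, hrs]
    exact List.Pairwise.map (f := fun r : Int × Int => r.1) (fun _ _ h => h) (PySem.List.sorted_pairwise regions (fun r => r.1))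
  have hget : ∀ (i : Nat) (hi_ : i < rs.length), starts[i]'(by omega) = (rs[i]).1 := by
    intro i hi_; simp [hstarts]
  obtain ⟨hk0, hkhi, hbel, habv⟩ := pvB_bsearch_spec starts pos hpw starts.length 0 starts.length
    (by omega) (by omega) (le_refl _) (by omega) (by omega)
  set k := pvB_bsearch starts pos 0 starts.length with hk
  rw [pvA_inRegion_iff]
  have hmemrs : (∃ r ∈ rs, r.1 ≤ pos ∧ pos ≤ r.2) ↔ (∃ r ∈ regions, r.1 ≤ pos ∧ pos ≤ r.2) := by
    constructor <;> rintro ⟨r, hr, h⟩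
    · exact ⟨r, (PySem.List.mem_sorted regions (fun r => r.1) false r).mp (hrs ▸ hr), h⟩
    · exact ⟨r, hrs ▸ (PySem.List.mem_sorted regions (fun r => r.1) false r).mpr hr, h⟩
  rw [← hmemrs]
  constructor
  · rintro ⟨hkpos, hpm⟩
    have hk1 : k - 1 < rs.length := by omega
    have := (pvB_prefmax_iff pos rs none (k - 1) hk1).mp hpm
    simp only [Option.elim, false_or, List.any_eq_true, decide_eq_true_eq] at this
    obtain ⟨r, hrmem, hre⟩ := this
    obtain ⟨i, hi_, hieq⟩ := List.mem_iff_getElem.mp hrmem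
    have hik : i < k := by
      have := hi_; simp only [List.length_take] at this; omega
    have hir : i < rs.length := by omega
    have htk : (rs.take (k - 1 + 1))[i] = rs[i] := List.getElem_take
    rw [htk] at hieq
    refine ⟨rs[i], List.getElem_mem hir, ?_, ?_⟩
    · have := hbel i (by omega) hik
      rw [hget i hir] at this
      exact this
    · rw [hieq]; exact hre
  · rintro ⟨r, hrmem, hr1, hr2⟩
    obtain ⟨i, hir, hieq⟩ := List.mem_iff_getElem.mp hrmem
    have hik : i < k := by
      by_contra hcon
      have := habv i (by omega) (by omega)
      rw [hget i hir, hieq] at this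
      omega
    have hkpos : k > 0 := by omega
    refine ⟨hkpos, ?_⟩
    have hk1 : k - 1 < rs.length := by omega
    rw [ge_iff_le, pvB_prefmax_iff pos rs none (k - 1) hk1]
    simp only [Option.elim, false_or, List.any_eq_true, decide_eq_true_eq]
    refine ⟨rs[i], ?_, by rw [hieq]; exact hr2⟩
    have htk : (rs.take (k - 1 + 1))[i]'(by simp only [List.length_take]; omega) = rs[i] :=
      List.getElem_take
    rw [← htk]
    exact List.getElem_mem _

-- ===== VERDICT (by name: the statement is the Claim_ definition above) =====
theorem filter_coverage_data_py_spec : Claim_equal_filter_coverage_data_py := by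
  intro positions coverage regions _
  unfold Spec_filter_coverage_data_py filter_coverage_data_py filter_coverage_data_py_alt
  simp only []
  apply PySem.List.foldl_congr_mem
  intro acc pc _
  have h := pvTest_iff pc.1 regions
  simp only [] at h
  by_cases hA : pvA_inRegion pc.1 regions = true
  · rw [if_pos hA, if_pos (h.mpr hA)]
  · rw [if_neg hA, if_neg (fun hc => hA (h.mp hc))]
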